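-- pv_equiv track=rewrite | github.com/Xiaoting-Xu/PyNCBIminer | PyNCBIminer_1.2.5_Windows_source_code/nt_calculator.py | identify_ends
-- ===== SOURCE A (Python) =====
-- def identify_ends(record):
--     if not isinstance(record, str):
--         sequence = str(record.seq)
--     else:
--         sequence = record
--     length = len(sequence)
--
--     for i in range(0, length, 1):
--         if sequence[i] != "-":
--             five_end = i
--             break
--
--     for i in range(length-1,0-1,-1):
--         if sequence[i] != "-":
--             three_end = i
--             break
--
--     return [five_end, three_end]
-- ===== SOURCE B (Python) =====
-- def identify_ends(record):
--     if not isinstance(record, str):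
--         sequence = str(record.seq)
--     else:
--         sequence = record
--     five_end = three_end = None
--     for i, ch in enumerate(sequence):
--         if ch != "-":
--             if five_end is None:
--                 five_end = i
--             three_end = i
--     return [five_end, three_end]
-- ===== Notes on version B (the rewrite author's own statement) =====
-- stated objective: alternative
-- what changed: Replaced A's two directional index scans (a forward range loop and a backward range loop, each with break) by a single forward fold over enumerate that records the first non-dash index once and overwrites the last non-dash index on every hit.
import Mathlib
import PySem

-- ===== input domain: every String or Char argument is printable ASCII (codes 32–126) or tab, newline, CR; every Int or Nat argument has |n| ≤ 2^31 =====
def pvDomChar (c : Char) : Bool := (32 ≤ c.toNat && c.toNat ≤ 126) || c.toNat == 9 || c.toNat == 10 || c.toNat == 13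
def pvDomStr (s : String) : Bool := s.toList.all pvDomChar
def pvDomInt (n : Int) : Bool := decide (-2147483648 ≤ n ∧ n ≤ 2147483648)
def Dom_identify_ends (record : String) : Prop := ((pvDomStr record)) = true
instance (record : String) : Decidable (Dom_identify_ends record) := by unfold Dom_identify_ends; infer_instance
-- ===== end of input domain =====

-- B replaces A's two directional range scans by a single forward fold over enumerate
-- tracking the first and last non-dash index (alternative decomposition, same cost).


-- ===== PORT A =====
-- A's 'for i in range(...): if sequence[i] != "-": ...; break' over an index list:
-- first index whose character is not '-' (none = the loop falls through, A raises).
def pvScanIdx (s : List Char) : List Int → Option Int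
  | [] => none
  | i :: rest => if PySem.List.pyGet? s i ≠ some '-' then some i else pvScanIdx s rest

def identify_ends (record : String) : List Int :=
  let sequence := record.toList
  let length : Int := sequence.length
  let five_end := pvScanIdx sequence (PySem.List.pyRange 0 length 1)
  let three_end := pvScanIdx sequence (PySem.List.pyRange (length - 1) (0 - 1) (-1))
  [five_end.getD 0, three_end.getD 0]  -- on Pre_ both are some; the getD 0 default is never reached

-- ===== PORT B =====
-- B's loop body: set five_end once (if still unset), overwrite three_end on every non-dash.
def pvStepB (st : Option Int × Option Int) (p : Int × Char) : Option Int × Option Int :=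
  if p.2 ≠ '-' then ((match st.1 with | none => some p.1 | some v => some v), some p.1)
  else st

def identify_ends_alt (record : String) : List Int :=
  let sequence := record.toList
  let st := (PySem.List.enumerate sequence).foldl pvStepB (none, none)
  [st.1.getD 0, st.2.getD 0]  -- on Pre_ both are some; the getD 0 default is never reached

-- ===== PRECONDITION & SPEC =====
-- Pre_ excludes exactly the inputs (empty or all-dash strings) on which neither of A's
-- loops ever breaks, so A raises UnboundLocalError at the return statement.
def Pre_identify_ends (record : String) : Prop :=
  (record.toList.any (fun c => c != '-')) = true
instance (record : String) : Decidable (Pre_identify_ends record) := by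
  unfold Pre_identify_ends; infer_instance

def pvWitness_identify_ends : String := "--AC-G-"

def Spec_identify_ends (record : String) (out : List Int) : Prop := out = identify_ends_alt record
instance (record : String) (out : List Int) : Decidable (Spec_identify_ends record out) := by unfold Spec_identify_ends; infer_instance

-- ===== CLAIM (what is proved, stated in full; the proofs are below) =====
def Claim_equal_identify_ends : Prop := ∀ (record : String), Dom_identify_ends record → Pre_identify_ends record → Spec_identify_ends record (identify_ends record)

-- ===== LEMMAS AND PROOFS =====

-- proof-side characterisations: first / last non-dash index of s, offset by k
def pvFirst (k : Int) : List Char → Option Int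
  | [] => none
  | c :: t => if c ≠ '-' then some k else pvFirst (k + 1) t

def pvLast (k : Int) : List Char → Option Int
  | [] => none
  | c :: t => (pvLast (k + 1) t).or (if c ≠ '-' then some k else none)

theorem pvB_fold (s : List Char) : ∀ (k : Int) (f0 t0 : Option Int),
    (PySem.List.enumerate s k).foldl pvStepB (f0, t0)
    = (f0.or (pvFirst k s), (pvLast k s).or t0) := by
  induction s with
  | nil => intro k f0 t0; simp [PySem.List.enumerate_nil, pvFirst, pvLast]
  | cons c t ih =>
    intro k f0 t0
    rw [PySem.List.enumerate_cons, List.foldl_cons]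
    by_cases hc : c = '-'
    · have hstep : pvStepB (f0, t0) (k, c) = (f0, t0) := by simp [pvStepB, hc]
      rw [hstep, ih]
      simp [pvFirst, pvLast, hc]
    · have hstep : pvStepB (f0, t0) (k, c) = (f0.or (some k), some k) := by
        cases f0 <;> simp [pvStepB, hc]
      rw [hstep, ih]
      cases f0 <;> cases h : pvLast (k + 1) t <;> simp [pvFirst, pvLast, hc, h]

theorem pvScan_congr (s1 s2 : List Char) : ∀ idxs : List Int,
    (∀ i ∈ idxs, PySem.List.pyGet? s1 i = PySem.List.pyGet? s2 i) →
    pvScanIdx s1 idxs = pvScanIdx s2 idxs := by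
  intro idxs
  induction idxs with
  | nil => intro _; rfl
  | cons i rest ih =>
    intro h
    simp only [pvScanIdx, h i (by simp)]
    rw [ih (fun j hj => h j (by simp [hj]))]

theorem pvScan_fwd : ∀ (t p : List Char),
    pvScanIdx (p ++ t) (PySem.List.pyRange (p.length : Int) (p.length + t.length) 1) =
      pvFirst (p.length : Int) t := by
  intro t
  induction t with
  | nil => intro p; simp [PySem.List.pyRange_one_eq_nil, pvFirst, pvScanIdx]
  | cons c u ih =>
    intro p
    rw [PySem.List.pyRange_one_cons (by simp only [List.length_cons]; push_cast; omega)]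
    have hget : PySem.List.pyGet? (p ++ c :: u) (p.length : Int) = some c := by
      rw [PySem.List.pyGet?_natCast]; simp
    by_cases hc : c = '-'
    · subst hc
      simp only [pvScanIdx, pvFirst, hget, ne_eq, not_true_eq_false, if_false]
      have h2 := ih (p ++ ['-'])
      simp only [List.append_assoc, List.singleton_append, List.length_append,
        List.length_cons, List.length_nil] at h2 ⊢
      push_cast at h2 ⊢
      rw [show (p.length : Int) + (u.length + 1) = p.length + 1 + u.length by ring]
      exact h2
    · simp [pvScanIdx, hc, pvFirst]

theorem pvLast_snoc (c : Char) : ∀ (u : List Char) (k : Int),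
    pvLast k (u ++ [c]) = if c ≠ '-' then some (k + u.length) else pvLast k u := by
  intro u
  induction u with
  | nil => intro k; by_cases hc : c = '-' <;> simp [pvLast, hc]
  | cons d v ih =>
    intro k
    simp only [List.cons_append, pvLast, ih]
    by_cases hc : c = '-'
    · simp [hc]
    · simp only [hc, ne_eq, not_false_eq_true, if_true, List.length_cons]
      rw [show (k + 1 + (v.length : Int)) = k + ((v.length : Int) + 1) by ring]
      simp

theorem pvScan_bwd (s : List Char) :
    pvScanIdx s (PySem.List.pyRange ((s.length : Int) - 1) (-1) (-1)) = pvLast 0 s := by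
  induction s using List.reverseRecOn with
  | nil => simp [PySem.List.pyRange_neg_one_eq_nil, pvScanIdx, pvLast]
  | append_singleton u c ih =>
    rw [PySem.List.pyRange_neg_one_cons
      (by simp only [List.length_append, List.length_cons, List.length_nil]; push_cast; omega)]
    have hlen : ((u ++ [c]).length : Int) - 1 = ((u.length : Nat) : Int) := by simp
    have hget : PySem.List.pyGet? (u ++ [c]) (((u ++ [c]).length : Int) - 1) = some c := by
      rw [hlen, PySem.List.pyGet?_natCast]; simp
    rw [pvLast_snoc]
    by_cases hc : c = '-'
    · subst hc
      simp only [pvScanIdx, hget, ne_eq, not_true_eq_false, if_false]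
      rw [pvScan_congr (u ++ ['-']) u _ ?_]
      · rw [show (((u ++ ['-']).length : Int) - 1 - 1) = ((u.length : Int) - 1) by simp]
        exact ih
      · intro i hi
        rw [PySem.List.mem_pyRange_neg_one] at hi
        have h0 : 0 ≤ i := by omega
        have hu : i < (u.length : Int) := by
          simp only [List.length_append, List.length_cons, List.length_nil] at hi
          push_cast at hi; omega
        obtain ⟨n, rfl⟩ := Int.eq_ofNat_of_zero_le h0
        rw [PySem.List.pyGet?_natCast, PySem.List.pyGet?_natCast]
        have hn : n < u.length := by exact_mod_cast hu
        rw [List.getElem?_append_left hn]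
    · rw [hlen]
      simp [pvScanIdx, hc]

-- ===== VERDICT (by name: the statement is the Claim_ definition above) =====
theorem identify_ends_spec : Claim_equal_identify_ends := by
  unfold Claim_equal_identify_ends
  intro record _ _
  unfold Spec_identify_ends identify_ends identify_ends_alt
  dsimp only
  rw [pvB_fold]
  have hf := pvScan_fwd record.toList []
  simp only [List.nil_append, List.length_nil, Nat.cast_zero, zero_add] at hf
  rw [hf, show (0 : Int) - 1 = (-1 : Int) by ring, pvScan_bwd]
  cases pvFirst 0 record.toList <;> cases pvLast 0 record.toList <;> simp
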